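-- pv_equiv track=rewrite | github.com/wojpo/AOC-2015 | Day-5/Script2.py | check_if_nice_string
-- ===== SOURCE A (Python) =====
-- def check_if_nice_string(string):
--     twice = False
--     pair = False
--     for i in range(len(string) - 1):
--         if string[i:i+2] in string[i+2:]:
--             pair = True
--     for i in range(len(string) - 2):
--         if string[i] == string[i+2]:
--             twice = True
--     if twice and pair:
--         return True
--     return False
-- ===== SOURCE B (Python) =====
-- def check_if_nice_string(string):
--     seen = set()
--     pair = False
--     twice = False
--     for i in range(len(string)):
--         if i >= 2:
--             seen.add((string[i - 2], string[i - 1]))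
--             if string[i - 2] == string[i]:
--                 twice = True
--         if i + 1 < len(string) and (string[i], string[i + 1]) in seen:
--             pair = True
--     return twice and pair
-- ===== Notes on version B (the rewrite author's own statement) =====
-- stated objective: faster
-- what changed: Replaces the two quadratic passes (a substring search of each 2-char window in the remaining suffix, plus a separate xyx scan) with a single pass that records already-seen character pairs in a set and checks both conditions on the fly.
import Mathlib
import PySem

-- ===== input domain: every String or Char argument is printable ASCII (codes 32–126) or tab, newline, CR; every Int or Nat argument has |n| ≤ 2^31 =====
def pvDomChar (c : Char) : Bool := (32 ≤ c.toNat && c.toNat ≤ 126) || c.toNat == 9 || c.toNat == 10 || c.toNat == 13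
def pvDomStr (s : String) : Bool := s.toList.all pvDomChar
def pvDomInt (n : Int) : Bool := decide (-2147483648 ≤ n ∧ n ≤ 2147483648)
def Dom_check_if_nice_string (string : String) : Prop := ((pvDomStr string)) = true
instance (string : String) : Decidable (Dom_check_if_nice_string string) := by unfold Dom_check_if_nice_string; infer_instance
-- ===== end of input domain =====

-- B replaces A's two passes (a quadratic substring search of each two-char window in the
-- remaining suffix, plus a separate xyx scan) by a single pass that remembers the character
-- pairs already seen in a set; objective: faster.

-- ===== PORT A =====
def check_if_nice_string (string : String) : Bool :=
  let cs := string.toList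
  let n : Int := PySem.Str.len string
  let pair := (PySem.List.pyRange 0 (n - 1) 1).foldl
    (fun acc i =>
      if PySem.Chars.isIn (PySem.List.slice cs (some i) (some (i + 2)))
          (PySem.List.slice cs (some (i + 2)) none) then true else acc) false
  let twice := (PySem.List.pyRange 0 (n - 2) 1).foldl
    (fun acc i =>
      if PySem.List.pyGetD cs i ' ' = PySem.List.pyGetD cs (i + 2) ' ' then true else acc) false
  if twice && pair then true else false

-- ===== PORT B =====
def check_if_nice_string_alt (string : String) : Bool :=
  let cs := string.toList
  let n : Int := PySem.Str.len string
  let st := (PySem.List.pyRange 0 n 1).foldl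
    (fun (st : PySem.Set (Char × Char) × Bool × Bool) i =>
      let seen := if 2 ≤ i then
          PySem.Set.add st.1 (PySem.List.pyGetD cs (i - 2) ' ', PySem.List.pyGetD cs (i - 1) ' ')
        else st.1
      let twice := if 2 ≤ i ∧ PySem.List.pyGetD cs (i - 2) ' ' = PySem.List.pyGetD cs i ' '
        then true else st.2.2
      let pair := if i + 1 < n ∧
          PySem.Set.contains seen (PySem.List.pyGetD cs i ' ', PySem.List.pyGetD cs (i + 1) ' ') = true
        then true else st.2.1
      (seen, pair, twice))
    (PySem.Set.empty, false, false)
  st.2.2 && st.2.1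

-- ===== PRECONDITION & SPEC =====
def Spec_check_if_nice_string (string : String) (out : Bool) : Prop := out = check_if_nice_string_alt string
instance (string : String) (out : Bool) : Decidable (Spec_check_if_nice_string string out) := by unfold Spec_check_if_nice_string; infer_instance

-- ===== CLAIM (what is proved, stated in full; the proofs are below) =====
def Claim_equal_check_if_nice_string : Prop := ∀ (string : String), Dom_check_if_nice_string string → Spec_check_if_nice_string string (check_if_nice_string string)

-- ===== LEMMAS AND PROOFS =====

def TwiceC (cs : List Char) (k : Nat) : Prop :=
  ∃ p : Nat, p + 2 < k ∧ cs.getD p ' ' = cs.getD (p + 2) ' '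
def PairC (cs : List Char) (k : Nat) : Prop :=
  ∃ q p : Nat, q < k ∧ q + 1 < cs.length ∧ p + 2 ≤ q ∧
    cs.getD p ' ' = cs.getD q ' ' ∧ cs.getD (p + 1) ' ' = cs.getD (q + 1) ' '
def SeenC (cs : List Char) (k : Nat) (x : Char × Char) : Prop :=
  ∃ p : Nat, p + 3 ≤ k ∧ x = (cs.getD p ' ', cs.getD (p + 1) ' ')
def fB (cs : List Char) (n : Int) (st : PySem.Set (Char × Char) × Bool × Bool) (i : Int) :
    PySem.Set (Char × Char) × Bool × Bool :=
  let seen := if 2 ≤ i then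
      PySem.Set.add st.1 (PySem.List.pyGetD cs (i - 2) ' ', PySem.List.pyGetD cs (i - 1) ' ')
    else st.1
  let twice := if 2 ≤ i ∧ PySem.List.pyGetD cs (i - 2) ' ' = PySem.List.pyGetD cs i ' '
    then true else st.2.2
  let pair := if i + 1 < n ∧
      PySem.Set.contains seen (PySem.List.pyGetD cs i ' ', PySem.List.pyGetD cs (i + 1) ' ') = true
    then true else st.2.1
  (seen, pair, twice)
def foldB (cs : List Char) (k : Nat) : PySem.Set (Char × Char) × Bool × Bool :=
  (List.range k).foldl (fun st t => fB cs (cs.length : Int) st (t : Int))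
    (PySem.Set.empty, false, false)
lemma foldl_if_or {α : Type} (p : α → Prop) [DecidablePred p] (l : List α) (b : Bool) :
    l.foldl (fun acc i => if p i then true else acc) b = (b || l.any (fun i => decide (p i))) := by
  induction l generalizing b with
  | nil => simp
  | cons x xs ih =>
    rw [List.foldl_cons]
    by_cases h : p x
    · rw [if_pos h, ih]; simp [h]
    · rw [if_neg h, ih]; simp [h]
lemma pyGetD_eq_getD (cs : List Char) (i : Int) (h0 : 0 ≤ i) (h1 : i < cs.length) :
    PySem.List.pyGetD cs i ' ' = cs.getD i.toNat ' ' := by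
  rw [PySem.List.pyGetD_eq_getElem cs ' ' h0 h1, List.getD_eq_getElem]
lemma if_true_else_iff (c : Prop) [Decidable c] (b : Bool) :
    ((if c then true else b) = true) ↔ (c ∨ b = true) := by
  split_ifs with h <;> simp [h]
lemma pair_prefix_iff (a b : Char) (l : List Char) :
    [a, b] <+: l ↔ l[0]? = some a ∧ l[1]? = some b := by
  cases l with
  | nil => simp
  | cons x t => cases t with
    | nil => simp [List.cons_prefix_cons]
    | cons y u => simp [List.cons_prefix_cons, eq_comm]
lemma isIn_char (cs : List Char) (p : Nat) (hp : p + 1 < cs.length) :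
    PySem.Chars.isIn (List.take 2 (List.drop p cs)) (List.drop (p + 2) cs) = true ↔
    ∃ q : Nat, p + 2 ≤ q ∧ q + 1 < cs.length ∧
      cs.getD p ' ' = cs.getD q ' ' ∧ cs.getD (p + 1) ' ' = cs.getD (q + 1) ' ' := by
  have ht : List.take 2 (List.drop p cs) = [cs[p], cs[p + 1]] := by
    rw [List.drop_eq_getElem_cons (show p < cs.length by omega),
        List.drop_eq_getElem_cons (show p + 1 < cs.length by omega)]
    rfl
  rw [ht, ← PySem.Chars.exists_prefix_drop_iff_isIn]
  constructor
  · rintro ⟨j, hj⟩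
    rw [List.drop_drop, pair_prefix_iff] at hj
    obtain ⟨h1, h2⟩ := hj
    rw [List.getElem?_drop] at h1 h2
    obtain ⟨hb2, he2⟩ := List.getElem?_eq_some_iff.mp h2
    have hq1 : p + 2 + j + 1 < cs.length := by omega
    refine ⟨p + 2 + j, by omega, hq1, ?_, ?_⟩
    · rw [List.getD_eq_getElem cs ' ' (show p < cs.length by omega),
          List.getD_eq_getElem cs ' ' (show p + 2 + j < cs.length by omega)]
      obtain ⟨h, he⟩ := List.getElem?_eq_some_iff.mp (by simpa using h1)
      exact he.symm
    · rw [List.getD_eq_getElem cs ' ' (show p + 1 < cs.length by omega),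
          List.getD_eq_getElem cs ' ' hq1]
      exact he2.symm
  · rintro ⟨q, hq2, hq1, e1, e2⟩
    refine ⟨q - (p + 2), ?_⟩
    rw [List.drop_drop, pair_prefix_iff]
    have hqq : p + 2 + (q - (p + 2)) = q := by omega
    rw [List.getElem?_drop, List.getElem?_drop, hqq]
    constructor
    · rw [List.getElem?_eq_some_iff]
      refine ⟨by omega, ?_⟩
      rw [List.getD_eq_getElem cs ' ' (show p < cs.length by omega),
          List.getD_eq_getElem cs ' ' (show q < cs.length by omega)] at e1
      simpa using e1.symm
    · rw [List.getElem?_eq_some_iff]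
      refine ⟨by omega, ?_⟩
      rw [List.getD_eq_getElem cs ' ' hp,
          List.getD_eq_getElem cs ' ' (show q + 1 < cs.length by omega)] at e2
      simpa using e2.symm
lemma A_twice_char (cs : List Char) :
    ((PySem.List.pyRange 0 ((cs.length : Int) - 2) 1).foldl
      (fun acc i =>
        if PySem.List.pyGetD cs i ' ' = PySem.List.pyGetD cs (i + 2) ' ' then true else acc) false) = true
    ↔ TwiceC cs cs.length := by
  rw [foldl_if_or (fun i => PySem.List.pyGetD cs i ' ' = PySem.List.pyGetD cs (i + 2) ' ')]
  simp only [Bool.false_or, List.any_eq_true, decide_eq_true_eq, PySem.List.mem_pyRange_one]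
  constructor
  · rintro ⟨i, ⟨h0, h1⟩, he⟩
    refine ⟨i.toNat, by omega, ?_⟩
    rw [pyGetD_eq_getD cs i h0 (by omega), pyGetD_eq_getD cs (i+2) (by omega) (by omega)] at he
    have : (i + 2).toNat = i.toNat + 2 := by omega
    rwa [this] at he
  · rintro ⟨p, hp, he⟩
    refine ⟨(p : Int), ⟨by omega, by omega⟩, ?_⟩
    rw [pyGetD_eq_getD cs p (by omega) (by omega), pyGetD_eq_getD cs ((p:Int)+2) (by omega) (by omega)]
    have : ((p : Int) + 2).toNat = p + 2 := by omega
    rw [this]; simpa using he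
lemma A_pair_char (cs : List Char) :
    ((PySem.List.pyRange 0 ((cs.length : Int) - 1) 1).foldl
      (fun acc i =>
        if PySem.Chars.isIn (PySem.List.slice cs (some i) (some (i + 2)))
            (PySem.List.slice cs (some (i + 2)) none) then true else acc) false) = true
    ↔ PairC cs cs.length := by
  rw [foldl_if_or (fun i => PySem.Chars.isIn (PySem.List.slice cs (some i) (some (i + 2)))
        (PySem.List.slice cs (some (i + 2)) none) = true)]
  simp only [Bool.false_or, List.any_eq_true, decide_eq_true_eq, PySem.List.mem_pyRange_one]
  constructor
  · rintro ⟨i, ⟨h0, h1⟩, he⟩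
    rw [PySem.List.slice_toNat cs h0 (by omega), PySem.List.slice_from cs (by omega : (0:Int) ≤ i + 2)] at he
    have e1 : (i + 2).toNat - i.toNat = 2 := by omega
    have e2 : (i + 2).toNat = i.toNat + 2 := by omega
    rw [e1, e2] at he
    have hp : i.toNat + 1 < cs.length := by omega
    obtain ⟨q, hq2, hq1, a1, a2⟩ := (isIn_char cs i.toNat hp).mp he
    exact ⟨q, i.toNat, by omega, hq1, hq2, a1, a2⟩
  · rintro ⟨q, p, hqk, hq1, hq2, a1, a2⟩
    refine ⟨(p : Int), ⟨by omega, by omega⟩, ?_⟩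
    rw [PySem.List.slice_toNat cs (by omega) (by omega), PySem.List.slice_from cs (by omega : (0:Int) ≤ (p:Int) + 2)]
    have e1 : ((p:Int) + 2).toNat - (p:Int).toNat = 2 := by omega
    have e2 : ((p:Int) + 2).toNat = (p:Int).toNat + 2 := by omega
    rw [e1, e2]
    have hp : (p:Int).toNat + 1 < cs.length := by omega
    refine (isIn_char cs (p:Int).toNat hp).mpr ?_
    have e3 : (p:Int).toNat = p := by omega
    rw [e3]
    exact ⟨q, hq2, hq1, a1, a2⟩
lemma B_invariant (cs : List Char) (k : Nat) (hk : k ≤ cs.length) :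
    (∀ x, x ∈ (foldB cs k).1 ↔ SeenC cs k x) ∧
    ((foldB cs k).2.1 = true ↔ PairC cs k) ∧
    ((foldB cs k).2.2 = true ↔ TwiceC cs k) := by
  induction k with
  | zero =>
    refine ⟨fun x => ?_, ?_, ?_⟩ <;>
      simp [foldB, SeenC, PairC, TwiceC, PySem.Set.empty]
  | succ k ih =>
    obtain ⟨ihS, ihP, ihT⟩ := ih (by omega)
    have hstep : foldB cs (k + 1) = fB cs (cs.length : Int) (foldB cs k) (k : Int) := by
      simp [foldB, List.range_succ]
    have hseenF : ∀ x, x ∈ (fB cs (cs.length : Int) (foldB cs k) (k : Int)).1 ↔ SeenC cs (k + 1) x := by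
      intro x
      show x ∈ (if (2:Int) ≤ (k:Int) then
          PySem.Set.add (foldB cs k).1
            (PySem.List.pyGetD cs ((k:Int) - 2) ' ', PySem.List.pyGetD cs ((k:Int) - 1) ' ')
        else (foldB cs k).1) ↔ _
      by_cases h2 : 2 ≤ k
      · rw [if_pos (by exact_mod_cast h2)]
        rw [pyGetD_eq_getD cs _ (by omega) (by omega),
            pyGetD_eq_getD cs _ (by omega) (by omega)]
        rw [PySem.Set.mem_add, ihS]
        have e1 : ((k:Int) - 2).toNat = k - 2 := by omega
        have e2 : ((k:Int) - 1).toNat = k - 1 := by omega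
        rw [e1, e2]
        constructor
        · rintro (⟨p, hp, he⟩ | he)
          · exact ⟨p, by omega, he⟩
          · refine ⟨k - 2, by omega, ?_⟩
            have : k - 2 + 1 = k - 1 := by omega
            rw [this]; exact he
        · rintro ⟨p, hp, he⟩
          by_cases hpk : p + 3 ≤ k
          · exact Or.inl ⟨p, hpk, he⟩
          · have hp2 : p = k - 2 := by omega
            refine Or.inr ?_
            subst hp2
            have : k - 2 + 1 = k - 1 := by omega
            rw [this] at he; exact he
      · rw [if_neg (by exact_mod_cast h2)]
        rw [ihS]
        constructor
        · rintro ⟨p, hp, he⟩; exact ⟨p, by omega, he⟩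
        · rintro ⟨p, hp, he⟩; exact ⟨p, by omega, he⟩
    have hseen : ∀ x, x ∈ (foldB cs (k + 1)).1 ↔ SeenC cs (k + 1) x := by
      intro x; rw [hstep]; exact hseenF x
    refine ⟨hseen, ?_, ?_⟩
    -- the pair component
    · rw [hstep]
      show (if (k:Int) + 1 < (cs.length : Int) ∧
          PySem.Set.contains (fB cs (cs.length : Int) (foldB cs k) (k : Int)).1
            (PySem.List.pyGetD cs (k:Int) ' ', PySem.List.pyGetD cs ((k:Int) + 1) ' ') = true
        then true else (foldB cs k).2.1) = true ↔ _
      rw [if_true_else_iff, ihP]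
      constructor
      · rintro (⟨hlt, hc⟩ | hP)
        · have hkn : k + 1 < cs.length := by exact_mod_cast hlt
          rw [PySem.Set.contains_iff, hseenF] at hc
          obtain ⟨p, hp, he⟩ := hc
          rw [pyGetD_eq_getD cs _ (by omega) (by omega),
              pyGetD_eq_getD cs _ (by omega) (by omega)] at he
          have e1 : ((k:Int)).toNat = k := by omega
          have e2 : ((k:Int) + 1).toNat = k + 1 := by omega
          rw [e1, e2] at he
          have he1 : cs.getD k ' ' = cs.getD p ' ' := congrArg Prod.fst he
          have he2 : cs.getD (k+1) ' ' = cs.getD (p+1) ' ' := congrArg Prod.snd he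
          exact ⟨k, p, by omega, hkn, by omega, he1.symm, he2.symm⟩
        · obtain ⟨q, p, hqk, hq1, hq2, a1, a2⟩ := hP
          exact ⟨q, p, by omega, hq1, hq2, a1, a2⟩
      · rintro ⟨q, p, hqk, hq1, hq2, a1, a2⟩
        by_cases hqlt : q < k
        · exact Or.inr ⟨q, p, hqlt, hq1, hq2, a1, a2⟩
        · have hqe : q = k := by omega
          subst hqe
          refine Or.inl ⟨by exact_mod_cast hq1, ?_⟩
          rw [PySem.Set.contains_iff, hseenF]
          refine ⟨p, by omega, ?_⟩
          rw [pyGetD_eq_getD cs _ (by omega) (by omega),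
              pyGetD_eq_getD cs _ (by omega) (by omega)]
          have e1 : ((q:Int)).toNat = q := by omega
          have e2 : ((q:Int) + 1).toNat = q + 1 := by omega
          rw [e1, e2, ← a1, ← a2]
    -- the twice component
    · rw [hstep]
      show (if (2:Int) ≤ (k:Int) ∧
          PySem.List.pyGetD cs ((k:Int) - 2) ' ' = PySem.List.pyGetD cs (k:Int) ' '
        then true else (foldB cs k).2.2) = true ↔ _
      rw [if_true_else_iff, ihT]
      constructor
      · rintro (⟨h2i, he⟩ | hT)
        · have h2 : 2 ≤ k := by exact_mod_cast h2i
          rw [pyGetD_eq_getD cs _ (by omega) (by omega),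
              pyGetD_eq_getD cs _ (by omega) (by omega)] at he
          have e1 : ((k:Int) - 2).toNat = k - 2 := by omega
          have e2 : ((k:Int)).toNat = k := by omega
          rw [e1, e2] at he
          refine ⟨k - 2, by omega, ?_⟩
          have : k - 2 + 2 = k := by omega
          rw [this]; exact he
        · obtain ⟨p, hp, he⟩ := hT
          exact ⟨p, by omega, he⟩
      · rintro ⟨p, hp, he⟩
        by_cases hpk : p + 2 < k
        · exact Or.inr ⟨p, hpk, he⟩
        · have hpe : p = k - 2 := by omega
          have h2 : 2 ≤ k := by omega
          refine Or.inl ⟨by exact_mod_cast h2, ?_⟩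
          rw [pyGetD_eq_getD cs _ (by omega) (by omega),
              pyGetD_eq_getD cs _ (by omega) (by omega)]
          have e1 : ((k:Int) - 2).toNat = k - 2 := by omega
          have e2 : ((k:Int)).toNat = k := by omega
          rw [e1, e2]
          subst hpe
          have : k - 2 + 2 = k := by omega
          rw [this] at he; exact he
lemma alt_eq (s : String) : check_if_nice_string_alt s =
    ((foldB s.toList s.toList.length).2.2 && (foldB s.toList s.toList.length).2.1) := by
  have hlen : PySem.Str.len s = (s.toList.length : Int) := by simp
  simp only [check_if_nice_string_alt, hlen]
  rw [show (PySem.List.pyRange 0 ((s.toList.length : Int)) 1) =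
      (List.range s.toList.length).map (fun k => ((k : Int))) from by
    rw [PySem.List.pyRange_one]
    simp only [Int.sub_zero, Int.toNat_natCast, zero_add]
    simp
    exact List.map_eq_flatMap]
  rw [List.foldl_map]
  rfl
lemma a_eq (s : String) : check_if_nice_string s =
    (((PySem.List.pyRange 0 ((s.toList.length : Int) - 2) 1).foldl
      (fun acc i =>
        if PySem.List.pyGetD s.toList i ' ' = PySem.List.pyGetD s.toList (i + 2) ' ' then true else acc) false) &&
     ((PySem.List.pyRange 0 ((s.toList.length : Int) - 1) 1).foldl
      (fun acc i =>
        if PySem.Chars.isIn (PySem.List.slice s.toList (some i) (some (i + 2)))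
            (PySem.List.slice s.toList (some (i + 2)) none) then true else acc) false)) := by
  have hlen : PySem.Str.len s = (s.toList.length : Int) := by simp
  simp only [check_if_nice_string, hlen]
  split_ifs with h
  · exact h.symm
  · rw [Bool.not_eq_true] at h
    exact h.symm

lemma check_if_nice_string_eq (s : String) :
    check_if_nice_string s = check_if_nice_string_alt s := by
  rw [a_eq, alt_eq]
  obtain ⟨_, hP, hT⟩ := B_invariant s.toList s.toList.length le_rfl
  have h1 := A_pair_char s.toList
  have h2 := A_twice_char s.toList
  rw [Bool.eq_iff_iff]
  simp only [Bool.and_eq_true]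
  rw [h1, h2, hP, hT]

-- ===== VERDICT (by name: the statement is the Claim_ definition above) =====
theorem check_if_nice_string_spec : Claim_equal_check_if_nice_string := by
  intro s _
  exact check_if_nice_string_eq s
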